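-- pv_equiv track=rewrite | github.com/saket2508/spreadsheet-brain | backend/tagging.py | classify_by_formula
-- ===== SOURCE A (Python) =====
-- from typing import List, Dict, Set
--
-- FORMULA_FUNCTIONS = {
--     'aggregation': ['sum', 'average', 'count', 'max', 'min', 'median'],
--     'lookup': ['vlookup', 'hlookup', 'index', 'match', 'xlookup'],
--     'conditional': ['if', 'sumif', 'countif', 'averageif', 'sumifs', 'countifs'],
--     'mathematical': ['round', 'abs', 'sqrt', 'power', 'log'],
--     'text': ['concatenate', 'left', 'right', 'mid', 'len', 'trim'],
--     'date': ['today', 'now', 'year', 'month', 'day', 'date']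
-- }
--
-- def classify_by_formula(formula_info: Dict) -> List[str]:
--     """Classify metrics based on formula analysis."""
--     categories = []
--
--     if not formula_info:
--         return categories
--
--     functions = formula_info.get('functions', [])
--     operations = formula_info.get('operations', [])
--
--     # Function-based classification
--     for func_category, func_list in FORMULA_FUNCTIONS.items():
--         if any(func.lower() in [f.lower() for f in functions] for func in func_list):
--             categories.append(f'formula_{func_category}')
--
--     # Operation-based classification
--     if 'division' in operations:
--         categories.append('ratio_calculation')
--     if 'subtraction' in operations:
--         categories.append('variance_calculation')
--     if 'multiplication' in operations:
--         categories.append('scaling_calculation')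
--
--     return categories
-- ===== SOURCE B (Python) =====
-- FORMULA_FUNCTIONS = {
--     'aggregation': ['sum', 'average', 'count', 'max', 'min', 'median'],
--     'lookup': ['vlookup', 'hlookup', 'index', 'match', 'xlookup'],
--     'conditional': ['if', 'sumif', 'countif', 'averageif', 'sumifs', 'countifs'],
--     'mathematical': ['round', 'abs', 'sqrt', 'power', 'log'],
--     'text': ['concatenate', 'left', 'right', 'mid', 'len', 'trim'],
--     'date': ['today', 'now', 'year', 'month', 'day', 'date']
-- }
--
-- # Inverted index: lowercased function name -> its category (built once).
-- FUNC_TO_CATEGORY = {func: cat for cat, funcs in FORMULA_FUNCTIONS.items() for func in funcs}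
--
-- OPERATION_TAGS = [
--     ('division', 'ratio_calculation'),
--     ('subtraction', 'variance_calculation'),
--     ('multiplication', 'scaling_calculation'),
-- ]
--
-- def classify_by_formula(formula_info):
--     """Classify metrics based on formula analysis."""
--     if not formula_info:
--         return []
--
--     functions = formula_info.get('functions', [])
--     operations = formula_info.get('operations', [])
--
--     # One pass over the input functions through the inverted index.
--     matched = {FUNC_TO_CATEGORY[g] for g in (f.lower() for f in functions) if g in FUNC_TO_CATEGORY}
--
--     # Emit categories in FORMULA_FUNCTIONS order (deduplicated by construction).
--     categories = ['formula_' + cat for cat in FORMULA_FUNCTIONS if cat in matched]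
--
--     for op, tag in OPERATION_TAGS:
--         if op in operations:
--             categories.append(tag)
--
--     return categories
-- ===== Notes on version B (the rewrite author's own statement) =====
-- stated objective: simpler
-- what changed: Replaces the nested category-by-category scan (which rebuilds the lowercased functions list for every candidate function name) with a single pass over the input functions through a precomputed inverted index FUNC_TO_CATEGORY, collecting matched categories into a set and then emitting them in FORMULA_FUNCTIONS key order; the operations block becomes a data-driven loop.
import Mathlib
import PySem

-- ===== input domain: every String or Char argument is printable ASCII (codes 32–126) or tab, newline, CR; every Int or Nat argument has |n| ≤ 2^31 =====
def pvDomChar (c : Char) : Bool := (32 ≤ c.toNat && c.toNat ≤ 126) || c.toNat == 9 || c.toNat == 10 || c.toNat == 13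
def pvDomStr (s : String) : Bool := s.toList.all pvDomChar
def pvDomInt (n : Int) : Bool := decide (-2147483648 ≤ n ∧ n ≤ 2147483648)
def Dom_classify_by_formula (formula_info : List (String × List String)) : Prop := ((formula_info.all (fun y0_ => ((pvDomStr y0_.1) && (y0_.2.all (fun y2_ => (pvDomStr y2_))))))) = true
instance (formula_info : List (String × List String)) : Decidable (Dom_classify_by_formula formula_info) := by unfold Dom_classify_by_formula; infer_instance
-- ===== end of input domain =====

-- B replaces A's per-category rescan of the lowercased functions list with one pass
-- through a precomputed inverted index (function name -> category); objective: simpler.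

-- ===== PORT A =====
def pvFF : List (String × List String) :=
  [("aggregation", ["sum", "average", "count", "max", "min", "median"]),
   ("lookup", ["vlookup", "hlookup", "index", "match", "xlookup"]),
   ("conditional", ["if", "sumif", "countif", "averageif", "sumifs", "countifs"]),
   ("mathematical", ["round", "abs", "sqrt", "power", "log"]),
   ("text", ["concatenate", "left", "right", "mid", "len", "trim"]),
   ("date", ["today", "now", "year", "month", "day", "date"])]

def classify_by_formula (formula_info : List (String × List String)) : List String :=
  if formula_info = [] then []
  else
    let functions := (PySem.Dict.mk formula_info).getD "functions" []
    let operations := (PySem.Dict.mk formula_info).getD "operations" []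
    let categories := pvFF.foldl (fun acc p =>
      if p.2.any (fun func =>
          (functions.map (fun f => PySem.Str.lower f)).contains (PySem.Str.lower func))
      then acc ++ ["formula_" ++ p.1] else acc) []
    let categories := if operations.contains "division" then categories ++ ["ratio_calculation"] else categories
    let categories := if operations.contains "subtraction" then categories ++ ["variance_calculation"] else categories
    let categories := if operations.contains "multiplication" then categories ++ ["scaling_calculation"] else categories
    categories

-- ===== PORT B =====
-- FUNC_TO_CATEGORY: the dict comprehension inserts each (func, cat) once; the 33 function
-- names are pairwise distinct, so the dict's item list is exactly this flatMap (exact).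
def pvF2C : PySem.Dict String String :=
  PySem.Dict.mk (pvFF.flatMap (fun p => p.2.map (fun func => (func, p.1))))

def pvOpTags : List (String × String) :=
  [("division", "ratio_calculation"),
   ("subtraction", "variance_calculation"),
   ("multiplication", "scaling_calculation")]

-- the set comprehension {FUNC_TO_CATEGORY[g] for g in (f.lower() for f in functions) if g in FUNC_TO_CATEGORY}
def pvMatched (functions : List String) : PySem.Set String :=
  functions.foldl (fun s f =>
    match pvF2C.get? (PySem.Str.lower f) with
    | some cat => s.add cat
    | none => s) PySem.Set.empty

def classify_by_formula_alt (formula_info : List (String × List String)) : List String :=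
  if formula_info = [] then []
  else
    let functions := (PySem.Dict.mk formula_info).getD "functions" []
    let operations := (PySem.Dict.mk formula_info).getD "operations" []
    let matched := pvMatched functions
    let categories := ((pvFF.map Prod.fst).filter (fun cat => matched.contains cat)).map
      (fun cat => "formula_" ++ cat)
    pvOpTags.foldl (fun acc p => if operations.contains p.1 then acc ++ [p.2] else acc) categories

-- ===== PRECONDITION & SPEC =====
def Spec_classify_by_formula (formula_info : List (String × List String)) (out : List String) : Prop := out = classify_by_formula_alt formula_info
instance (formula_info : List (String × List String)) (out : List String) : Decidable (Spec_classify_by_formula formula_info out) := by unfold Spec_classify_by_formula; infer_instance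

-- ===== CLAIM (what is proved, stated in full; the proofs are below) =====
def Claim_equal_classify_by_formula : Prop := ∀ (formula_info : List (String × List String)), Dom_classify_by_formula formula_info → Spec_classify_by_formula formula_info (classify_by_formula formula_info)

-- ===== LEMMAS AND PROOFS =====

-- membership in the matched set = some input function maps to cat through the index
theorem pv_mem_matched (functions : List String) (cat : String) :
    cat ∈ pvMatched functions ↔ ∃ f ∈ functions, pvF2C.get? (PySem.Str.lower f) = some cat := by
  have h : ∀ (F : List String) (s : PySem.Set String),
      cat ∈ F.foldl (fun s f =>
        match pvF2C.get? (PySem.Str.lower f) with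
        | some c => s.add c
        | none => s) s ↔ cat ∈ s ∨ ∃ f ∈ F, pvF2C.get? (PySem.Str.lower f) = some cat := by
    intro F
    induction F with
    | nil => simp
    | cons f F ih =>
      intro s
      simp only [List.foldl_cons, ih, List.mem_cons]
      cases hg : pvF2C.get? (PySem.Str.lower f) with
      | none => simp [hg]
      | some c =>
        simp only [PySem.Set.mem_add]
        constructor
        · rintro ((hs | rfl) | ⟨g, hgF, hgc⟩)
          · exact Or.inl hs
          · exact Or.inr ⟨f, Or.inl rfl, hg⟩
          · exact Or.inr ⟨g, Or.inr hgF, hgc⟩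
        · rintro (hs | ⟨g, (rfl | hgF), hgc⟩)
          · exact Or.inl (Or.inl hs)
          · rw [hg] at hgc; exact Or.inl (Or.inr (Option.some.inj hgc).symm)
          · exact Or.inr ⟨g, hgF, hgc⟩
  simpa using h functions PySem.Set.empty

-- first-match lookup on a dict literal with pairwise-distinct keys is plain membership
theorem pv_get?_mk_eq_some : ∀ (l : List (String × String)), (l.map Prod.fst).Nodup → ∀ (g v : String),
    (PySem.Dict.mk l).get? g = some v ↔ (g, v) ∈ l := by
  intro l
  induction l with
  | nil => intro _ g v; simp [PySem.Dict.get?]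
  | cons p rest ih =>
    rintro hnd g v
    obtain ⟨k, w⟩ := p
    simp only [List.map_cons, List.nodup_cons] at hnd
    rw [PySem.Dict.get?_mk_cons]
    by_cases hk : k = g
    · subst hk
      rw [if_pos (by simp)]
      simp only [List.mem_cons, Prod.mk.injEq, true_and]
      constructor
      · intro h; exact Or.inl (Option.some.inj h).symm
      · rintro (rfl | h2)
        · rfl
        · exact absurd (List.mem_map_of_mem h2) hnd.1
    · rw [if_neg (by simp [hk]), ih hnd.2]
      simp [List.mem_cons, Prod.ext_iff, Ne.symm hk]

-- characterisation of the inverted index, one lemma per category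
theorem pv_get_agg (g : String) : pvF2C.get? g = some "aggregation" ↔ g ∈ ["sum", "average", "count", "max", "min", "median"] := by
  simp only [pvF2C]; rw [pv_get?_mk_eq_some _ (by decide)]; simp [pvFF, Prod.ext_iff]

theorem pv_get_lookup (g : String) : pvF2C.get? g = some "lookup" ↔ g ∈ ["vlookup", "hlookup", "index", "match", "xlookup"] := by
  simp only [pvF2C]; rw [pv_get?_mk_eq_some _ (by decide)]; simp [pvFF, Prod.ext_iff]

theorem pv_get_cond (g : String) : pvF2C.get? g = some "conditional" ↔ g ∈ ["if", "sumif", "countif", "averageif", "sumifs", "countifs"] := by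
  simp only [pvF2C]; rw [pv_get?_mk_eq_some _ (by decide)]; simp [pvFF, Prod.ext_iff]

theorem pv_get_math (g : String) : pvF2C.get? g = some "mathematical" ↔ g ∈ ["round", "abs", "sqrt", "power", "log"] := by
  simp only [pvF2C]; rw [pv_get?_mk_eq_some _ (by decide)]; simp [pvFF, Prod.ext_iff]

theorem pv_get_text (g : String) : pvF2C.get? g = some "text" ↔ g ∈ ["concatenate", "left", "right", "mid", "len", "trim"] := by
  simp only [pvF2C]; rw [pv_get?_mk_eq_some _ (by decide)]; simp [pvFF, Prod.ext_iff]

theorem pv_get_date (g : String) : pvF2C.get? g = some "date" ↔ g ∈ ["today", "now", "year", "month", "day", "date"] := by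
  simp only [pvF2C]; rw [pv_get?_mk_eq_some _ (by decide)]; simp [pvFF, Prod.ext_iff]

-- A's condition for a category = B's membership test on the matched set
set_option maxHeartbeats 1000000 in
theorem pv_key (cat : String) (L : List String)
    (hG : ∀ g, pvF2C.get? g = some cat ↔ g ∈ L)
    (hlow : ∀ func ∈ L, PySem.Str.lower func = func)
    (F : List String) :
    (L.any (fun func => (F.map (fun f => PySem.Str.lower f)).contains (PySem.Str.lower func)))
      = (pvMatched F).contains cat := by
  rw [Bool.eq_iff_iff]
  simp only [List.any_eq_true, List.contains_iff_mem, List.mem_map,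
    PySem.Set.contains_iff, pv_mem_matched, hG]
  constructor
  · rintro ⟨func, hfL, f, hfF, hlf⟩
    exact ⟨f, hfF, by rw [hlf, hlow func hfL]; exact hfL⟩
  · rintro ⟨f, hfF, hmem⟩
    exact ⟨PySem.Str.lower f, hmem, f, hfF, (hlow _ hmem).symm⟩

-- a guarded append-fold is a filter-then-map, generically (linear, no case blowup)
theorem pv_foldl_filter (cond : String × List String → Bool) (c : String → Bool)
    (f : String → String) :
    ∀ (l : List (String × List String)) (acc : List String), (∀ p ∈ l, cond p = c p.1) →
      l.foldl (fun acc p => if cond p = true then acc ++ [f p.1] else acc) acc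
        = acc ++ ((l.map Prod.fst).filter c).map f := by
  intro l
  induction l with
  | nil => simp
  | cons p l ih =>
    intro acc hc
    simp only [List.foldl_cons, List.map_cons, List.filter_cons]
    rw [hc p List.mem_cons_self, ih _ (fun q hq => hc q (List.mem_cons_of_mem _ hq))]
    by_cases hcp : c p.1 = true
    · simp [hcp]
    · simp [hcp]

-- A's category fold equals B's filter-map over the category keys
theorem pv_cats (F : List String) :
    pvFF.foldl (fun acc p =>
        if (p.2.any fun func =>
            (F.map (fun f => PySem.Str.lower f)).contains (PySem.Str.lower func)) = true
        then acc ++ ["formula_" ++ p.1] else acc) []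
      = ((pvFF.map Prod.fst).filter (fun cat => (pvMatched F).contains cat)).map
          (fun cat => "formula_" ++ cat) := by
  have hc : ∀ p ∈ pvFF,
      (p.2.any fun func =>
        (F.map (fun f => PySem.Str.lower f)).contains (PySem.Str.lower func))
      = (fun cat => (pvMatched F).contains cat) p.1 := by
    intro p hp
    fin_cases hp
    · exact pv_key "aggregation" _ pv_get_agg (by decide) F
    · exact pv_key "lookup" _ pv_get_lookup (by decide) F
    · exact pv_key "conditional" _ pv_get_cond (by decide) F
    · exact pv_key "mathematical" _ pv_get_math (by decide) F
    · exact pv_key "text" _ pv_get_text (by decide) F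
    · exact pv_key "date" _ pv_get_date (by decide) F
  simpa using pv_foldl_filter
    (fun p => p.2.any fun func =>
      (F.map (fun f => PySem.Str.lower f)).contains (PySem.Str.lower func))
    (fun cat => (pvMatched F).contains cat)
    (fun cat => "formula_" ++ cat) pvFF [] hc

-- ===== VERDICT (by name: the statement is the Claim_ definition above) =====
set_option maxHeartbeats 1000000 in
theorem classify_by_formula_spec : Claim_equal_classify_by_formula := by
  intro fi _
  unfold Spec_classify_by_formula classify_by_formula classify_by_formula_alt
  by_cases h : fi = []
  · simp [h]
  · simp only [if_neg h]
    rw [pv_cats]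
    simp only [pvOpTags, List.foldl_cons, List.foldl_nil]
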